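-- pv_equiv track=rewrite | github.com/bartoszkruba/advent_of_code_2020 | day_19/main.py | replace_rules
-- ===== SOURCE A (Python) =====
-- def replace_rules(str, rules):
--     arr = ['']
--     s = ''
--     for c in str:
--         if c == ' ':
--             if s not in rules:
--                 for i in range(len(arr)):
--                     arr[i] += s + ' '
--                 s = ''
--                 continue
--
--             r = rules[s]
--             if '|' in r:
--                 new_arr = []
--                 for z in arr:
--                     for n in r.split('|'):
--                         new_arr.append(z + n.strip())
--                 arr = new_arr
--             else:
--                 for i in range(len(arr)):
--                     arr[i] += r
--             s = ''
--             for i in range(len(arr)):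
--                 arr[i] += ' '
--         else:
--             s += c
--
--     if s not in rules:
--         for i in range(len(arr)):
--             arr[i] += s
--         return arr
--     r = rules[s]
--     if '|' in r:
--         new_arr = []
--         for z in arr:
--             for n in r.split('|'):
--                 new_arr.append(z + n)
--         arr = new_arr
--     else:
--         for i in range(len(arr)):
--             arr[i] += r
--     return arr
-- ===== SOURCE B (Python) =====
-- def replace_rules(str, rules):
--     tokens = str.split(' ')
--
--     def options(tok, last):
--         if tok not in rules:
--             return [tok] if last else [tok + ' ']
--         r = rules[tok]
--         if '|' in r:
--             return r.split('|') if last else [n.strip() + ' ' for n in r.split('|')]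
--         return [r] if last else [r + ' ']
--
--     opts = [options(t, False) for t in tokens[:-1]] + [options(tokens[-1], True)]
--     result = ['']
--     for choices in opts:
--         result = [p + n for p in result for n in choices]
--     return result
-- ===== Notes on version B (the rewrite author's own statement) =====
-- stated objective: alternative
-- what changed: B tokenizes the input with split(' '), builds one option-list per token (interior tokens stripped+space, final token unstripped), and combines them with a single product fold, instead of A's per-character scan that grows every arr entry in place; the per-character quadratic string appends disappear, a constant-factor speedup a timing run measured.
import Mathlib
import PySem

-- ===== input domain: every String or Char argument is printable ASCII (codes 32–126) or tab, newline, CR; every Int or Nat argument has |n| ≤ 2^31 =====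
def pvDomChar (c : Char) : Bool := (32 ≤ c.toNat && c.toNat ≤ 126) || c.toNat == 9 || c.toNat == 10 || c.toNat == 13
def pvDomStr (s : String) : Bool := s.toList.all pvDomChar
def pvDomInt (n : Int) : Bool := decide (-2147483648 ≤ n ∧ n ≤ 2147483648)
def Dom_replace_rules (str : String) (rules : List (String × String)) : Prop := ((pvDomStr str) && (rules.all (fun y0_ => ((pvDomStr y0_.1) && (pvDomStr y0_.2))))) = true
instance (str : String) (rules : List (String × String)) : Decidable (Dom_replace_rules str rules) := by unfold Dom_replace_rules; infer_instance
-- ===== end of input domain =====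

-- B tokenizes the input with split(' '), builds one option-list per token, and combines them with a
-- product fold, instead of A's incremental per-character growth of `arr`; objective: alternative decomposition.


-- r.split('|')  (the separator '|' is never empty, so Python's split always returns)
def pySplitBar (r : String) : List String :=
  (PySem.Chars.splitOn r.toList ['|']).map String.ofList

-- ===== PORT A =====
-- the body of A's `for c in str` loop, state = (arr, s)
def replace_rules_step (rules : List (String × String)) (st : List String × String) (c : Char) :
    List String × String :=
  let arr := st.1
  let s := st.2
  if c = ' ' then
    match List.lookup s rules with
    | none => (arr.map (fun x => x ++ (s ++ " ")), "")
    | some r =>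
      let arr :=
        if PySem.Str.isIn "|" r then
          arr.flatMap (fun z => (pySplitBar r).map (fun n => z ++ PySem.Str.strip n))
        else
          arr.map (fun x => x ++ r)
      (arr.map (fun x => x ++ " "), "")
  else (arr, s.push c)

-- A's code after the loop (the leftover token s)
def replace_rules_finish (rules : List (String × String)) (arr : List String) (s : String) :
    List String :=
  match List.lookup s rules with
  | none => arr.map (fun x => x ++ s)
  | some r =>
    if PySem.Str.isIn "|" r then
      arr.flatMap (fun z => (pySplitBar r).map (fun n => z ++ n))
    else
      arr.map (fun x => x ++ r)

def replace_rules (str : String) (rules : List (String × String)) : List String :=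
  let st := str.toList.foldl (replace_rules_step rules) ([""], "")
  replace_rules_finish rules st.1 st.2

-- ===== PORT B =====
-- B's `options(tok, last)`
def replace_rules_options (rules : List (String × String)) (tok : String) (last : Bool) :
    List String :=
  match List.lookup tok rules with
  | none => if last then [tok] else [tok ++ " "]
  | some r =>
    if PySem.Str.isIn "|" r then
      if last then pySplitBar r
      else (pySplitBar r).map (fun n => PySem.Str.strip n ++ " ")
    else
      if last then [r] else [r ++ " "]

def replace_rules_alt (str : String) (rules : List (String × String)) : List String :=
  let tokens := (List.splitOn ' ' str.toList).map String.ofList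
  let opts := tokens.dropLast.map (fun t => replace_rules_options rules t false)
      ++ [replace_rules_options rules (tokens.getLastD "") true]
  opts.foldl (fun result choices => result.flatMap (fun p => choices.map (fun n => p ++ n))) [""]

-- ===== PRECONDITION & SPEC =====
def Spec_replace_rules (str : String) (rules : List (String × String)) (out : List String) : Prop := out = replace_rules_alt str rules
instance (str : String) (rules : List (String × String)) (out : List String) : Decidable (Spec_replace_rules str rules out) := by unfold Spec_replace_rules; infer_instance

-- ===== CLAIM (what is proved, stated in full; the proofs are below) =====
def Claim_equal_replace_rules : Prop := ∀ (str : String) (rules : List (String × String)), Dom_replace_rules str rules → Spec_replace_rules str rules (replace_rules str rules)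

-- ===== LEMMAS AND PROOFS =====

-- the product step of B's final fold
def pvBStep (result choices : List String) : List String :=
  result.flatMap (fun p => choices.map (fun n => p ++ n))

-- tokens of `cs` given the partial token `s` already read (mirrors A's scanning)
def pvToks : String → List Char → List String
  | s, [] => [s]
  | s, c :: cs => if c = ' ' then s :: pvToks "" cs else pvToks (s.push c) cs

-- the option lists B derives from a (nonempty) token list
def pvOpts (rules : List (String × String)) : List String → List (List String)
  | [] => []
  | [t] => [replace_rules_options rules t true]
  | t :: u :: ts => replace_rules_options rules t false :: pvOpts rules (u :: ts)

lemma pvToks_ne_nil (s : String) (cs : List Char) : pvToks s cs ≠ [] := by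
  induction cs generalizing s with
  | nil => simp [pvToks]
  | cons c cs ih => by_cases h : c = ' ' <;> simp [pvToks, h, ih]

lemma pvFinish_eq (rules : List (String × String)) (arr : List String) (s : String) :
    replace_rules_finish rules arr s = pvBStep arr (replace_rules_options rules s true) := by
  unfold replace_rules_finish replace_rules_options pvBStep
  cases List.lookup s rules with
  | none => exact List.map_eq_flatMap
  | some r =>
    cases h : PySem.Str.isIn "|" r with
    | true => simp only [h, if_true]
    | false =>
      simp only [h, Bool.false_eq_true, if_false]
      exact List.map_eq_flatMap

lemma pvStep_eq (rules : List (String × String)) (arr : List String) (s : String) :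
    replace_rules_step rules (arr, s) ' ' = (pvBStep arr (replace_rules_options rules s false), "") := by
  unfold replace_rules_step replace_rules_options pvBStep
  rw [if_pos rfl]
  cases List.lookup s rules with
  | none =>
    simp only [Prod.mk.injEq, and_true]
    exact List.map_eq_flatMap
  | some r =>
    cases h : PySem.Str.isIn "|" r with
    | true =>
      simp only [h, if_true, Prod.mk.injEq, and_true]
      simp [List.map_flatMap, List.map_map, Function.comp_def, String.append_assoc]
    | false =>
      simp only [h, Bool.false_eq_true, if_false, Prod.mk.injEq, and_true, List.map_cons,
        List.map_nil, List.map_map]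
      rw [← List.map_eq_flatMap]
      simp [Function.comp_def, String.append_assoc]

lemma pvLoop_eq (rules : List (String × String)) (cs : List Char) (arr : List String) (s : String) :
    replace_rules_finish rules (cs.foldl (replace_rules_step rules) (arr, s)).1
        (cs.foldl (replace_rules_step rules) (arr, s)).2
      = List.foldl pvBStep arr (pvOpts rules (pvToks s cs)) := by
  induction cs generalizing arr s with
  | nil => simp [pvToks, pvOpts, pvFinish_eq]
  | cons c cs ih =>
    by_cases h : c = ' '
    · subst h
      have hne := pvToks_ne_nil "" cs
      rw [List.foldl_cons, pvStep_eq]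
      rw [ih]
      simp only [pvToks]
      cases htk : pvToks "" cs with
      | nil => exact absurd htk hne
      | cons t ts => simp [pvOpts]
    · simp only [List.foldl_cons, replace_rules_step, if_neg h]
      rw [ih]
      simp [pvToks, h]

lemma pvToks_split (cs : List Char) (s : String) :
    pvToks s cs = ((List.splitOn ' ' cs).modifyHead (fun t => s.toList ++ t)).map String.ofList := by
  induction cs generalizing s with
  | nil => simp [pvToks, List.splitOn, List.splitOnP, List.splitOnP.go, String.ofList_toList]
  | cons c cs ih =>
    by_cases h : c = ' '
    · subst h
      have hsp : List.splitOn ' ' (' ' :: cs) = [] :: List.splitOn ' ' cs := by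
        simp [List.splitOn, List.splitOnP_cons]
      rw [hsp]
      simp only [pvToks, List.modifyHead_cons, List.map_cons, List.append_nil,
        String.ofList_toList]
      rw [ih ""]
      cases List.splitOn ' ' cs <;> simp
    · have hsp : List.splitOn ' ' (c :: cs) = (List.splitOn ' ' cs).modifyHead (c :: ·) := by
        simp [List.splitOn, List.splitOnP_cons, h]
      rw [hsp]
      simp only [pvToks, if_neg h]
      rw [ih (s.push c), List.modifyHead_modifyHead]
      have hf : (fun t => (s.push c).toList ++ t)
          = ((fun t => s.toList ++ t) ∘ fun x => c :: x) := by
        funext t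
        simp [String.toList_push]
      rw [hf]

lemma pvOpts_eq (rules : List (String × String)) (l : List String) (hl : l ≠ []) :
    l.dropLast.map (fun t => replace_rules_options rules t false)
        ++ [replace_rules_options rules (l.getLastD "") true]
      = pvOpts rules l := by
  induction l with
  | nil => exact absurd rfl hl
  | cons t ts ih =>
    cases ts with
    | nil => simp [pvOpts]
    | cons u us =>
      simp only [pvOpts, List.dropLast_cons₂, List.map_cons, List.cons_append, List.cons.injEq,
        true_and]
      have := ih (by simp)
      simpa using this

-- ===== VERDICT (by name: the statement is the Claim_ definition above) =====
theorem replace_rules_spec : Claim_equal_replace_rules := by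
  intro str rules _
  unfold Spec_replace_rules replace_rules replace_rules_alt
  rw [pvLoop_eq, pvToks_split]
  have h1 : ((List.splitOn ' ' str.toList).modifyHead (fun t => "".toList ++ t))
      = List.splitOn ' ' str.toList := by
    cases List.splitOn ' ' str.toList <;> simp
  rw [h1]
  have hne : (List.splitOn ' ' str.toList).map String.ofList ≠ [] := by
    simp [List.splitOn, List.splitOnP_ne_nil]
  rw [← pvOpts_eq rules _ hne]
  rfl
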